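-- pv_equiv track=rewrite | github.com/michaelsprintson/me.nu | menu_read/menu_read.py | recallfind
-- ===== SOURCE A (Python) =====
-- def findidx(usemenu, findprice):
--     """
--     :param usemenu: menu result from OCR
--     :param findprice: True if we are finding the price section idx, otherwise for food section idx
--     :return:
--     """
--
--     for lineidx in range(len(usemenu)):
--         if findprice:
--             if (usemenu[lineidx][0]).isdigit():  # if its a price
--                 sectionidx = lineidx
--                 break
--         else:  # if its a food item
--             if not (usemenu[lineidx][0]).isdigit():
--                 sectionidx = lineidx
--                 break
--         if lineidx == len(usemenu) - 1:
--             return len(usemenu) - 1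
--     return sectionidx
--
-- def recallfind(usemenu):
--     """
--     :param usemenu: menu result of OCR
--     :return: a list of the indexes in the menu lines where it changes from dishes to itesm
--     """
--     current = 0
--     outto = [0]
--     pricefind = True
--     while current < len(usemenu)-1:
--         sectionplace = findidx(usemenu[current:], pricefind)
--         current += sectionplace
--         outto.append(current)
--         pricefind = not pricefind
--     print (outto)
--     return outto
-- ===== SOURCE B (Python) =====
-- def recallfind(usemenu):
--     # One forward scan keeping a "looking for digit-first line?" flag,
--     # instead of re-slicing the suffix and rescanning it at every boundary.
--     n = len(usemenu)
--     outto = [0]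
--     if n <= 1:
--         print(outto)
--         return outto
--     want = True
--     i = 0
--     matched_last = False
--     while i < n:
--         if usemenu[i][0].isdigit() == want:
--             outto.append(i)
--             want = not want
--             if i == n - 1:
--                 matched_last = True
--                 break
--         i += 1
--     if not matched_last:
--         outto.append(n - 1)
--     print(outto)
--     return outto
-- ===== Notes on version B (the rewrite author's own statement) =====
-- stated objective: alternative
-- what changed: A re-slices the suffix usemenu[current:] and rescans it with the helper findidx at every boundary; B makes one forward pass over the lines with a moving index and a wanted-kind (digit/non-digit) flag, with no slicing, helper, or rescanning.
import Mathlib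
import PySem

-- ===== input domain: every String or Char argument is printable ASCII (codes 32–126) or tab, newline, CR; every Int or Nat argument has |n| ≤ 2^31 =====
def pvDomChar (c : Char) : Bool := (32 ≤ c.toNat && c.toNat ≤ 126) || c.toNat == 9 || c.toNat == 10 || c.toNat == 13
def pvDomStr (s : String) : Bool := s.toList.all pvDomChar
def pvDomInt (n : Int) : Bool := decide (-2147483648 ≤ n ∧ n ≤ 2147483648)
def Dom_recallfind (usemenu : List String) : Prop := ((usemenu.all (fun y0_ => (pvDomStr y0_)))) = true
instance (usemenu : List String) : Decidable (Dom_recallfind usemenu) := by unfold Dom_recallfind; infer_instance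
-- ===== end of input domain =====

-- B replaces A's re-slice-and-rescan of the suffix at every boundary by one forward scan
-- with a moving index and a wanted-kind flag (objective: alternative).

-- ===== PORT A =====
-- findidx: the for-loop over indices, ported as recursion over the remaining list carrying
-- lineidx; `none` marks Python's raise paths (IndexError on line[0] of an empty string,
-- NameError when the loop body never runs on an empty list).
def findidxA : List String → Bool → Int → Option Int
  | [], _, _ => none
  | s :: rest, findprice, lineidx =>
    match PySem.Str.pyGet? s 0 with
    | none => none
    | some c =>
      if PySem.Chars.isdigit c == findprice then some lineidx
      else if rest = [] then some lineidx          -- lineidx == len(usemenu) - 1: return len - 1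
      else findidxA rest findprice (lineidx + 1)

-- the while-loop of recallfind, with fuel (2*len+2 provably suffices on Pre_)
def loopA (usemenu : List String) : Nat → Int → List Int → Bool → List Int
  | 0, _, outto, _ => outto
  | fuel + 1, current, outto, pricefind =>
    if current < (usemenu.length : Int) - 1 then
      match findidxA (PySem.List.slice usemenu (some current) none) pricefind 0 with
      | none => outto                              -- findidx raised (outside Pre_)
      | some sectionplace =>
          loopA usemenu fuel (current + sectionplace)
            (outto ++ [current + sectionplace]) (!pricefind)
    else outto

def recallfind (usemenu : List String) : List Int :=
  loopA usemenu (2 * usemenu.length + 2) 0 [0] true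

-- ===== PORT B =====
-- single forward scan; `none`-lookup (empty string) returns the accumulator (outside Pre_)
def loopB (n : Int) : List String → Bool → Int → List Int → List Int
  | [], _, _, out => out ++ [n - 1]                -- scan ended without matching the last line
  | s :: rest, want, i, out =>
    match PySem.Str.pyGet? s 0 with
    | none => out
    | some c =>
      if PySem.Chars.isdigit c == want then
        if i == n - 1 then out ++ [i]
        else loopB n rest (!want) (i + 1) (out ++ [i])
      else loopB n rest want (i + 1) out

def recallfind_alt (usemenu : List String) : List Int :=
  if usemenu.length ≤ 1 then [0]
  else loopB (usemenu.length : Int) usemenu true 0 [0]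

-- ===== PRECONDITION & SPEC =====
-- Pre_ excludes lists of two or more lines containing an empty line: A inspects line[0] of
-- every line and raises IndexError on the empty string (a single line is never inspected).
def Pre_recallfind (usemenu : List String) : Prop :=
  usemenu.length ≤ 1 ∨ ∀ s ∈ usemenu, s ≠ ""
instance (usemenu : List String) : Decidable (Pre_recallfind usemenu) := by
  unfold Pre_recallfind; infer_instance

def pvWitness_recallfind : List String := ["tea", "12", "cake", "3"]

def Spec_recallfind (usemenu : List String) (out : List Int) : Prop := out = recallfind_alt usemenu
instance (usemenu : List String) (out : List Int) : Decidable (Spec_recallfind usemenu out) := by unfold Spec_recallfind; infer_instance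

-- ===== CLAIM (what is proved, stated in full; the proofs are below) =====
def Claim_equal_recallfind : Prop := ∀ (usemenu : List String), Dom_recallfind usemenu → Pre_recallfind usemenu → Spec_recallfind usemenu (recallfind usemenu)

-- ===== LEMMAS AND PROOFS =====

-- the digit-status of a line's first character (false on the empty string, never used there)
def digfirst (s : String) : Bool :=
  match s.toList with
  | [] => false
  | c :: _ => PySem.Chars.isdigit c

lemma toList_ne_nil {s : String} (h : s ≠ "") : s.toList ≠ [] := by
  simpa [String.toList_eq_nil_iff] using h

lemma findidxA_cons (s : String) (t : List String) (fp : Bool) (idx : Int)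
    (hs : s.toList ≠ []) :
    findidxA (s :: t) fp idx =
      if digfirst s == fp then some idx
      else if t = [] then some idx
      else findidxA t fp (idx + 1) := by
  obtain ⟨c, cs, hc⟩ := List.exists_cons_of_ne_nil hs
  simp [findidxA, pysem, hc, digfirst]

lemma loopB_cons (n : Int) (s : String) (t : List String) (want : Bool) (i : Int)
    (out : List Int) (hs : s.toList ≠ []) :
    loopB n (s :: t) want i out =
      if digfirst s == want then
        (if i == n - 1 then out ++ [i] else loopB n t (!want) (i + 1) (out ++ [i]))
      else loopB n t want (i + 1) out := by
  obtain ⟨c, cs, hc⟩ := List.exists_cons_of_ne_nil hs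
  simp [loopB, pysem, hc, digfirst]

lemma findidxA_shift (t : List String) (fp : Bool) :
    ∀ idx : Int, findidxA t fp idx = (findidxA t fp 0).map (· + idx) := by
  induction t with
  | nil => intro idx; simp [findidxA]
  | cons s r ih =>
    intro idx
    simp only [findidxA]
    cases PySem.Str.pyGet? s 0 with
    | none => simp
    | some c =>
      by_cases h1 : PySem.Chars.isdigit c == fp
      · simp [h1]
      · by_cases h2 : r = []
        · simp [h1, h2]
        · simp only [h1, h2, if_false, Bool.false_eq_true]
          rw [ih (idx + 1), ih (0 + 1)]
          cases h : findidxA r fp 0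
          · simp
          · simp; ring

lemma main_loop (usemenu : List String) :
    ∀ (M : Nat), ∀ (xs : List String) (j : Nat) (pf : Bool) (out : List Int) (fuel : Nat),
    usemenu.drop j = xs → 2 ≤ xs.length → (∀ s ∈ xs, s ≠ "") →
    2 * xs.length + (if digfirst xs.headI == pf then 1 else 0) ≤ M → M < fuel →
    loopA usemenu fuel j out pf = loopB (usemenu.length : Int) xs pf j out := by
  intro M
  induction M using Nat.strong_induction_on with
  | _ M IH =>
    intro xs j pf out fuel hdrop hlen hne hM hfuel
    obtain ⟨s, t, rfl⟩ : ∃ s t, xs = s :: t := by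
      cases xs with
      | nil => simp at hlen
      | cons a b => exact ⟨a, b, rfl⟩
    have ht : t ≠ [] := by
      cases t with
      | nil => simp at hlen
      | cons _ _ => simp
    have hsne : s.toList ≠ [] := toList_ne_nil (hne s (by simp))
    -- lengths
    have hlendrop : (s :: t).length = usemenu.length - j := by
      rw [← hdrop]; exact List.length_drop
    have hjn : j + (s :: t).length = usemenu.length := by
      have : j ≤ usemenu.length := by
        by_contra hcon
        have : usemenu.drop j = [] := List.drop_eq_nil_of_le (by omega)
        rw [hdrop] at this; simp at this
      omega
    obtain ⟨fuel, rfl⟩ : ∃ f, fuel = f + 1 := ⟨fuel - 1, by omega⟩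
    have hcond : (j : Int) < (usemenu.length : Int) - 1 := by
      have h2 : 2 ≤ (s :: t).length := hlen
      omega
    have hslice : PySem.List.slice usemenu (some (j : Int)) none = s :: t := by
      rw [PySem.List.slice_from_natCast, hdrop]
    rw [loopA, if_pos hcond, hslice, findidxA_cons s t pf 0 hsne]
    by_cases hd : digfirst s == pf
    · -- first line matches: A appends j and flips; B appends j and flips
      rw [if_pos hd, loopB_cons _ _ _ _ _ _ hsne, if_pos hd]
      have hne' : ((j : Int) == (usemenu.length : Int) - 1) = false := by
        simp only [beq_eq_false_iff_ne, ne_eq]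
        intro h; omega
      rw [hne', if_neg (by simp)]
      have hd' : (digfirst (s :: t).headI == !pf) = false := by
        simp only [List.headI]
        cases pf <;> simp_all
      have hM' : 2 * (s :: t).length + 1 ≤ M := by
        simpa [List.headI, hd] using hM
      have hne2 : digfirst s ≠ !pf := by simpa [List.headI] using hd'
      have hIH := IH (M - 1) (by omega) (s :: t) j (!pf) (out ++ [(j : Int)]) fuel
        hdrop hlen hne (by simp [List.headI, hne2] at hM' ⊢; omega) (by omega)
      simp only [Int.add_zero]
      have hd'' : (digfirst s == !pf) = false := by
        simpa [List.headI] using hd'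
      rw [hIH, loopB_cons _ _ _ _ _ _ hsne, hd'', if_neg (by simp)]
    · -- first line does not match: both skip it
      rw [if_neg hd, if_neg ht]
      simp only [zero_add]
      rw [loopB_cons _ _ _ _ _ _ hsne, if_neg hd]
      obtain ⟨u, t', rfl⟩ : ∃ u t', t = u :: t' := by
        cases t with
        | nil => exact absurd rfl ht
        | cons a b => exact ⟨a, b, rfl⟩
      have hune : u.toList ≠ [] := toList_ne_nil (hne u (by simp))
      cases t' with
      | nil =>
        -- t = [u]: the last line; A's findidx returns 1 either way, loop then stops
        have hfid : findidxA [u] pf 1 = some 1 := by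
          rw [findidxA_cons u [] pf 1 hune]
          by_cases h : digfirst u == pf <;> simp [h]
        rw [hfid]
        simp only []
        obtain ⟨fuel, rfl⟩ : ∃ f, fuel = f + 1 := ⟨fuel - 1, by omega⟩
        have hstop : ¬ ((j : Int) + 1 < (usemenu.length : Int) - 1) := by
          simp only [List.length_cons, List.length_nil] at hjn; omega
        rw [loopA, if_neg hstop]
        have hlast : (j : Int) + 1 = (usemenu.length : Int) - 1 := by
          simp only [List.length_cons, List.length_nil] at hjn; omega
        rw [loopB_cons _ _ _ _ _ _ hune]
        by_cases h : digfirst u == pf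
        · rw [if_pos h, if_pos (by simp [hlast])]
        · rw [if_neg h]
          simp only [loopB]
          rw [← hlast]
      | cons v t'' =>
        -- t has ≥ 2 lines: A at j behaves as A at j+1 (shift), then the IH applies
        rw [findidxA_shift (u :: v :: t'') pf 1]
        have hdrop' : usemenu.drop (j + 1) = u :: v :: t'' := by
          rw [← List.drop_drop, hdrop]; rfl
        have hrec : (match (findidxA (u :: v :: t'') pf 0).map (· + 1) with
            | none => out
            | some sp => loopA usemenu fuel ((j : Int) + sp) (out ++ [(j : Int) + sp]) (!pf))
            = loopA usemenu (fuel + 1) (j + 1 : Nat) out pf := by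
          have hcond' : ((j + 1 : Nat) : Int) < (usemenu.length : Int) - 1 := by
            simp only [List.length_cons] at hjn; push_cast; omega
          have hslice' : PySem.List.slice usemenu (some ((j + 1 : Nat) : Int)) none
              = u :: v :: t'' := by
            rw [PySem.List.slice_from_natCast, hdrop']
          rw [loopA, if_pos hcond', hslice']
          cases h : findidxA (u :: v :: t'') pf 0 with
          | none => simp
          | some m =>
            simp only [Option.map_some]
            have : (j : Int) + (m + 1) = ((j + 1 : Nat) : Int) + m := by push_cast; ring
            rw [this]
        rw [hrec]
        have := IH (M - 1) (by omega) (u :: v :: t'') (j + 1) pf out (fuel + 1)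
          hdrop' (by simp) (fun x hx => hne x (by simp [hx]))
          (by
            have hdf : (digfirst s == pf) = false := by simpa using hd
            simp only [List.headI, List.length_cons, hdf] at hM ⊢
            by_cases h : digfirst u == pf <;> simp [h] at hM ⊢ <;> omega)
          (by omega)
        rw [this]
        norm_cast

-- ===== VERDICT (by name: the statement is the Claim_ definition above) =====
theorem recallfind_spec : Claim_equal_recallfind := by
  intro usemenu _hdom hpre
  unfold Spec_recallfind recallfind recallfind_alt
  by_cases hlen : usemenu.length ≤ 1
  · rw [if_pos hlen]
    show loopA usemenu (2 * usemenu.length + 1 + 1) 0 [0] true = [0]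
    rw [loopA, if_neg (by omega)]
  · rw [if_neg hlen]
    have hne : ∀ s ∈ usemenu, s ≠ "" := by
      cases hpre with
      | inl h => omega
      | inr h => exact h
    have := main_loop usemenu (2 * usemenu.length + 1) usemenu 0 true [0]
      (2 * usemenu.length + 2) (by simp) (by omega) hne
      (by by_cases h : digfirst usemenu.headI == true <;> simp [h])
      (by omega)
    simpa using this
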